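-- pv_equiv track=rewrite | github.com/ekkus93/vscode_skills | skills/stock-research/stock_research.py | normalize_cli_args
-- ===== SOURCE A (Python) =====
-- def normalize_cli_args(argv: list[str] | None) -> list[str] | None:
--     if argv is None:
--         return None
--
--     normalized: list[str] = []
--     supported_flags = {"--ticker", "--period", "--news", "--limit", "--site"}
--     for arg in argv:
--         matched = False
--         for flag in supported_flags:
--             prefix = f"{flag}:"
--             if arg.startswith(prefix):
--                 normalized.extend([flag, arg[len(prefix) :]])
--                 matched = True
--                 break
--         if not matched:
--             normalized.append(arg)
--     return normalized
-- ===== SOURCE B (Python) =====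
-- def normalize_cli_args(argv):
--     if argv is None:
--         return None
--     supported = ("--ticker", "--period", "--news", "--limit", "--site")
--     normalized = []
--     for arg in argv:
--         head, sep, tail = arg.partition(":")
--         if sep and head in supported:
--             normalized.append(head)
--             normalized.append(tail)
--         else:
--             normalized.append(arg)
--     return normalized
-- ===== Notes on version B (the rewrite author's own statement) =====
-- stated objective: simpler
-- what changed: B splits each argument once at its first colon with str.partition and does a single membership test of the head against the supported flags, instead of A's inner loop over the five flag prefixes with startswith and slicing.
import Mathlib
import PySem

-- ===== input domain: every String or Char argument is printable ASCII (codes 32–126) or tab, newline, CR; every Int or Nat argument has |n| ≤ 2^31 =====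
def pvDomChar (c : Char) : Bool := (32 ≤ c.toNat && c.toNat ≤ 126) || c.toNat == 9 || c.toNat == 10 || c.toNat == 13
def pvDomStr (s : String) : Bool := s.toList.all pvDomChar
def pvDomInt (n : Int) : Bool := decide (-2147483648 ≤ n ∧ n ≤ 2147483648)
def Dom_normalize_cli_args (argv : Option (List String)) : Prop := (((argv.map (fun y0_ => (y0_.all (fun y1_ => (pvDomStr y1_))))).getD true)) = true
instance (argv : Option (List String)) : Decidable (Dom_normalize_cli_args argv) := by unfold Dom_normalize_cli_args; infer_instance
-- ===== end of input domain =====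

-- B replaces A's inner loop over the five "flag:" prefixes by one partition at the
-- first colon plus a single membership test of the head (objective: simpler).

-- ===== PORT A =====
-- the supported flags (a Python set of 5 distinct strings; iteration order cannot
-- matter since at most one flag prefix can match a given arg)
def pvFlags : List (List Char) :=
  [['-','-','t','i','c','k','e','r'], ['-','-','p','e','r','i','o','d'],
   ['-','-','n','e','w','s'], ['-','-','l','i','m','i','t'], ['-','-','s','i','t','e']]

-- A's inner 'for flag in supported_flags' loop with break / matched bookkeeping:
-- first flag whose "flag:" prefix matches yields [flag, arg[len(prefix):]], else [arg]
def pvTryFlagsA (a : List Char) : List (List Char) → List (List Char)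
  | [] => [a]
  | f :: rest =>
      let pre := f ++ [':']
      if PySem.Chars.startswith a pre then [f, PySem.Chars.slice a (some (pre.length : Int)) none]
      else pvTryFlagsA a rest

def normalize_cli_args (argv : Option (List String)) : Option (List String) :=
  match argv with
  | none => none
  | some args =>
      some (args.foldl (fun normalized arg =>
        normalized ++ (pvTryFlagsA arg.toList pvFlags).map (fun cs => String.ofList cs)) [])

-- ===== PORT B =====
-- arg.partition(":"): none = no colon; some (head, tail) = parts around the FIRST colon
def pvPartColon : List Char → Option (List Char × List Char)
  | [] => none
  | c :: cs =>
      if c = ':' then some ([], cs)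
      else match pvPartColon cs with
        | some (h, t) => some (c :: h, t)
        | none => none

def pvProcB (a : List Char) : List (List Char) :=
  match pvPartColon a with
  | some (h, t) => if h ∈ pvFlags then [h, t] else [a]
  | none => [a]

def normalize_cli_args_alt (argv : Option (List String)) : Option (List String) :=
  match argv with
  | none => none
  | some args =>
      some (args.foldl (fun normalized arg =>
        normalized ++ (pvProcB arg.toList).map (fun cs => String.ofList cs)) [])

-- ===== PRECONDITION & SPEC =====
def Spec_normalize_cli_args (argv : Option (List String)) (out : Option (List String)) : Prop := out = normalize_cli_args_alt argv
instance (argv : Option (List String)) (out : Option (List String)) : Decidable (Spec_normalize_cli_args argv out) := by unfold Spec_normalize_cli_args; infer_instance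

-- ===== CLAIM (what is proved, stated in full; the proofs are below) =====
def Claim_equal_normalize_cli_args : Prop := ∀ (argv : Option (List String)), Dom_normalize_cli_args argv → Spec_normalize_cli_args argv (normalize_cli_args argv)

-- ===== LEMMAS AND PROOFS =====

theorem pvPartColon_none_iff (a : List Char) : pvPartColon a = none ↔ ':' ∉ a := by
  induction a with
  | nil => simp [pvPartColon]
  | cons c cs ih =>
      simp only [pvPartColon]
      by_cases hc : c = ':'
      · simp [hc]
      · cases h : pvPartColon cs with
        | none => simp [hc, ← ih, h, Ne.symm hc]
        | some p =>
            have hm : ':' ∈ cs := by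
              by_contra hn
              rw [ih.mpr hn] at h
              simp at h
            simp [hc, hm]

theorem pvPartColon_some (a h t : List Char) (hp : pvPartColon a = some (h, t)) :
    a = h ++ ':' :: t ∧ ':' ∉ h := by
  induction a generalizing h t with
  | nil => simp [pvPartColon] at hp
  | cons c cs ih =>
      simp only [pvPartColon] at hp
      by_cases hc : c = ':'
      · simp [hc] at hp
        simp [hc, hp.1, hp.2]
      · simp only [if_neg hc] at hp
        cases hq : pvPartColon cs with
        | none => simp [hq] at hp
        | some p =>
            obtain ⟨h', t'⟩ := p
            simp [hq] at hp
            obtain ⟨hh, ht⟩ := hp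
            obtain ⟨e1, e2⟩ := ih h' t' hq
            subst hh ht
            simp [e1, e2, Ne.symm hc]

theorem prefix_colon (f : List Char) : ∀ h t : List Char, ':' ∉ f → ':' ∉ h →
    (f ++ [':']) <+: (h ++ ':' :: t) → f = h := by
  induction f with
  | nil =>
      intro h t _ hh hp
      cases h with
      | nil => rfl
      | cons d h' =>
          rw [List.nil_append, List.cons_append] at hp
          have hd := (List.cons_prefix_cons.mp hp).1
          simp only [List.mem_cons, not_or] at hh
          exact absurd hd hh.1
  | cons c f' ih =>
      intro h t hf hh hp
      rw [List.cons_append] at hp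
      cases h with
      | nil =>
          rw [List.nil_append] at hp
          have hd := (List.cons_prefix_cons.mp hp).1
          simp [hd] at hf
      | cons d h' =>
          rw [List.cons_append] at hp
          obtain ⟨hcd, hp'⟩ := List.cons_prefix_cons.mp hp
          have hrec := ih h' t (by simp only [List.mem_cons, not_or] at hf; exact hf.2)
            (by simp only [List.mem_cons, not_or] at hh; exact hh.2) hp'
          rw [hcd, hrec]

theorem prefix_colon_iff (f h t : List Char) (hf : ':' ∉ f) (hh : ':' ∉ h) :
    (f ++ [':']) <+: (h ++ ':' :: t) ↔ f = h := by
  constructor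
  · exact prefix_colon f h t hf hh
  · rintro rfl
    exact ⟨t, by simp⟩

theorem pvTryFlagsA_eq_of_part (h t : List Char) (hh : ':' ∉ h)
    (fs : List (List Char)) (hfs : ∀ f ∈ fs, ':' ∉ f) :
    pvTryFlagsA (h ++ ':' :: t) fs = if h ∈ fs then [h, t] else [h ++ ':' :: t] := by
  induction fs with
  | nil => simp [pvTryFlagsA]
  | cons f rest ih =>
      have hf : ':' ∉ f := hfs f (by simp)
      simp only [pvTryFlagsA]
      by_cases hsw : PySem.Chars.startswith (h ++ ':' :: t) (f ++ [':']) = true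
      · have hfe : f = h :=
          (prefix_colon_iff f h t hf hh).mp ((PySem.Chars.startswith_iff _ _).mp hsw)
        subst hfe
        rw [if_pos hsw]
        simp only [PySem.Chars.slice_eq_listSlice, List.length_append, List.length_cons,
          List.length_nil, Nat.cast_add, zero_add, Nat.cast_one]
        rw [show ((f.length : Int) + 1) = ((f.length + 1 : Nat) : Int) by push_cast; ring,
          PySem.List.slice_from_natCast]
        simp
      · have hfe : f ≠ h := fun e =>
          hsw ((PySem.Chars.startswith_iff _ _).mpr ((prefix_colon_iff f h t hf hh).mpr e))
        rw [if_neg hsw, ih (fun g hg => hfs g (by simp [hg]))]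
        by_cases hm : h ∈ rest
        · simp [hm, Ne.symm hfe]
        · simp [hm, Ne.symm hfe]

theorem pvTryFlagsA_no_colon (a : List Char) (ha : ':' ∉ a)
    (fs : List (List Char)) : pvTryFlagsA a fs = [a] := by
  induction fs with
  | nil => rfl
  | cons f rest ih =>
      simp only [pvTryFlagsA]
      have hns : ¬ PySem.Chars.startswith a (f ++ [':']) = true := by
        intro hsw
        obtain ⟨l, hl⟩ := (PySem.Chars.startswith_iff _ _).mp hsw
        exact ha (by rw [← hl]; simp)
      rw [if_neg hns, ih]

theorem pvPerArg (a : List Char) : pvTryFlagsA a pvFlags = pvProcB a := by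
  unfold pvProcB
  cases hp : pvPartColon a with
  | none => rw [pvTryFlagsA_no_colon a ((pvPartColon_none_iff a).mp hp)]
  | some p =>
      obtain ⟨h, t⟩ := p
      obtain ⟨he, hh⟩ := pvPartColon_some a h t hp
      rw [he, pvTryFlagsA_eq_of_part h t hh pvFlags (by decide)]

-- ===== VERDICT (by name: the statement is the Claim_ definition above) =====
theorem normalize_cli_args_spec : Claim_equal_normalize_cli_args := by
  intro argv _
  unfold Spec_normalize_cli_args normalize_cli_args normalize_cli_args_alt
  cases argv with
  | none => rfl
  | some args => simp [pvPerArg]
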